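-- pv_equiv track=rewrite | github.com/coreygirard/humansort | test_sort.py | gen_test_case
-- ===== SOURCE A (Python) =====
-- import itertools
--
-- def gen_index_via_mod(s, n):
--     """Converts the provided integer 'n' into a valid insertion point
--     in the string 's', ie the current index locations or at the end
--     """
--     if len(s) == 0:
--         return 0
--
--     return n%(len(s)+1)
--
-- def remove_adjacent_nums(n):
--     """Make sure we don't insert in adjacent locations, otherwise the numbers
--     will join together and our created ordering will be invalid, failing test.
--     """
--     output = []
--     for e in n:
--         if len(output) == 0 or output[-1][0] <= e[0]-2:
--             output.append(e)
--     return output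
--
-- def split_to_indices_and_values(n):
--     indices = []
--     values = []
--
--     for i, j in n:
--         if j != []:
--             indices.append(i)
--             values.append(sorted(list(set(j))))
--     return indices, values
--
-- def build_filename(s, indices, values):
--     s = list(s)
--     for (n, i), v in zip(enumerate(indices), values):
--         s.insert(n+i, str(v))
--     return ''.join(s)
--
-- def gen_test_case(s, n):
--     filenames = []
--
--     n = [[gen_index_via_mod(s, i), j] for i, j in n]
--     n = sorted(n, key=lambda x: x[0])
--     n = remove_adjacent_nums(n)
--
--     indices, values = split_to_indices_and_values(n)
--
--     for v in itertools.product(*values):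
--         filenames.append(build_filename(s, indices, v))
--
--     return filenames
-- ===== SOURCE B (Python) =====
-- import itertools
--
--
-- def gen_test_case(s, n):
--     L = len(s)
--     norm = sorted([((i % (L + 1)) if L else 0, j) for i, j in n],
--                   key=lambda e: e[0])
--
--     # one pass: drop adjacent insertion points (tracking only the last kept
--     # index) and, for kept entries with values, collect index + sorted set
--     last = None
--     idxs = []
--     vals = []
--     for i, j in norm:
--         if last is not None and i - last < 2:
--             continue
--         last = i
--         if j:
--             idxs.append(i)
--             vals.append(sorted(set(j)))
--
--     # precompute the fixed string segments once
--     segs = []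
--     prev = 0
--     for i in idxs:
--         segs.append(s[prev:i])
--         prev = i
--     tail = s[prev:]
--
--     out = []
--     for combo in itertools.product(*vals):
--         parts = []
--         for seg, v in zip(segs, combo):
--             parts.append(seg)
--             parts.append(str(v))
--         parts.append(tail)
--         out.append(''.join(parts))
--     return out
-- ===== Notes on version B (the rewrite author's own statement) =====
-- stated objective: alternative
-- what changed: The remove-adjacent and index/value-splitting loops are fused into a single pass tracking only the last kept index, and the per-combination list(s).insert loop is replaced by precomputing the fixed string segments once by slicing and join-interleaving them with the values.
import Mathlib
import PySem

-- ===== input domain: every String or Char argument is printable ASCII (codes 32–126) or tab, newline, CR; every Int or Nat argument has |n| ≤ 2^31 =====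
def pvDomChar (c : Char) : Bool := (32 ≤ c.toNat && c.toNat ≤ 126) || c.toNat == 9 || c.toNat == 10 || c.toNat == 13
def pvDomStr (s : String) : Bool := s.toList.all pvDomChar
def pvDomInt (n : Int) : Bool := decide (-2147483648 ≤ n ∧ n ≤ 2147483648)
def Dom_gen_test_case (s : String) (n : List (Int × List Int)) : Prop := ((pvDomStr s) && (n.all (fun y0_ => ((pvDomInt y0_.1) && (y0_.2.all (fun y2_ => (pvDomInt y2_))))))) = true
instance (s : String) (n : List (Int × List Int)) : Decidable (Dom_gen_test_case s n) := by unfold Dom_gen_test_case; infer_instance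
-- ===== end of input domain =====

-- B fuses A's remove-adjacent and splitting loops into one pass tracking only the last kept
-- index, and builds each filename by join-interleaving precomputed string segments instead of
-- repeated list(s).insert — an alternative decomposition of the same cost (not claimed faster).

-- ===== PORT A =====
def gen_index_via_mod (s : String) (n : Int) : Int :=
  if PySem.Str.len s = 0 then 0 else PySem.Int.mod n (PySem.Str.len s + 1)

-- the body of the 'for e in n' loop of remove_adjacent_nums
def raStep (output : List (Int × List Int)) (e : Int × List Int) : List (Int × List Int) :=
  match output.getLast? with
  | none => output ++ [e]                                     -- len(output) == 0
  | some last => if last.1 ≤ e.1 - 2 then output ++ [e] else output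

def remove_adjacent_nums (n : List (Int × List Int)) : List (Int × List Int) :=
  n.foldl raStep []

-- the body of the 'for i, j in n' loop of split_to_indices_and_values
def splitStep (acc : List Int × List (List Int)) (ij : Int × List Int) :
    List Int × List (List Int) :=
  if ij.2 ≠ [] then
    (acc.1 ++ [ij.1], acc.2 ++ [PySem.List.sorted (PySem.Set.ofList ij.2) (fun x => x)])
  else acc

def split_to_indices_and_values (n : List (Int × List Int)) : List Int × List (List Int) :=
  n.foldl splitStep ([], [])

def build_filename (s : String) (indices : List Int) (values : List Int) : String :=
  let s0 : List String := s.toList.map (fun c => String.ofList [c])   -- s = list(s)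
  let s1 := (List.zip (PySem.List.enumerate indices) values).foldl
      (fun acc p => PySem.List.insert acc (p.1.1 + p.1.2) (PySem.Int.toStr p.2)) s0
  PySem.Str.join "" s1

-- itertools.product(*values) over a list of int lists, in itertools order
def pyProductInt : List (List Int) → List (List Int)
  | [] => [[]]
  | xs :: rest => xs.flatMap (fun x => (pyProductInt rest).map (x :: ·))

def gen_test_case (s : String) (n : List (Int × List Int)) : List String :=
  let n1 := n.map (fun ij => (gen_index_via_mod s ij.1, ij.2))
  let n2 := PySem.List.sorted n1 (fun x => x.1)
  let n3 := remove_adjacent_nums n2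
  let iv := split_to_indices_and_values n3
  (pyProductInt iv.2).foldl (fun fns v => fns ++ [build_filename s iv.1 v]) []

-- ===== PORT B =====
-- the body of B's fused 'for i, j in norm' loop (state: last kept index, idxs, vals)
def gtcFuseStep (acc : Option Int × List Int × List (List Int)) (ij : Int × List Int) :
    Option Int × List Int × List (List Int) :=
  if acc.1.elim false (fun l => decide (ij.1 - l < 2)) then acc
  else (some ij.1,
    if ij.2 ≠ [] then
      (acc.2.1 ++ [ij.1], acc.2.2 ++ [PySem.List.sorted (PySem.Set.ofList ij.2) (fun x => x)])
    else acc.2)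

def gen_test_case_alt (s : String) (n : List (Int × List Int)) : List String :=
  let L := PySem.Str.len s
  let norm := PySem.List.sorted
    (n.map (fun ij => ((if L ≠ 0 then PySem.Int.mod ij.1 (L + 1) else 0), ij.2)))
    (fun e => e.1)
  let st := norm.foldl gtcFuseStep (none, [], [])
  let sp := st.2.1.foldl (fun (sp : List String × Int) i =>
      (sp.1 ++ [PySem.Str.slice s (some sp.2) (some i)], i)) ([], 0)
  let tail := PySem.Str.slice s (some sp.2) none
  (pyProductInt st.2.2).foldl (fun out combo =>
    (out ++ [PySem.Str.join ""
      (((List.zip sp.1 combo).foldl (fun ps p => ps ++ [p.1, PySem.Int.toStr p.2]) [])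
        ++ [tail])])) []

-- ===== PRECONDITION & SPEC =====
def Spec_gen_test_case (s : String) (n : List (Int × List Int)) (out : List String) : Prop := out = gen_test_case_alt s n
instance (s : String) (n : List (Int × List Int)) (out : List String) : Decidable (Spec_gen_test_case s n out) := by unfold Spec_gen_test_case; infer_instance

-- ===== CLAIM (what is proved, stated in full; the proofs are below) =====
def Claim_equal_gen_test_case : Prop := ∀ (s : String) (n : List (Int × List Int)), Dom_gen_test_case s n → Spec_gen_test_case s n (gen_test_case s n)

-- ===== LEMMAS AND PROOFS =====

-- the two normalisation maps agree
lemma gim_eq (s : String) (i : Int) :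
    gen_index_via_mod s i
      = (if PySem.Str.len s ≠ 0 then PySem.Int.mod i (PySem.Str.len s + 1) else 0) := by
  unfold gen_index_via_mod; split_ifs with h1 h2 <;> simp_all

-- a normalised index is a valid insertion point: 0 ≤ i ≤ len(s)
lemma gim_bounds (s : String) (j : Int) :
    0 ≤ gen_index_via_mod s j ∧ gen_index_via_mod s j ≤ (s.toList.length : Int) := by
  unfold gen_index_via_mod
  rw [PySem.Str.len_eq]
  split_ifs with h
  · omega
  · have hpos : (0 : Int) < (s.toList.length : Int) + 1 := by omega
    exact ⟨PySem.Int.mod_nonneg _ hpos, by have := PySem.Int.mod_lt j hpos; omega⟩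

-- B's fused loop step mirrors remove-adjacent + split
lemma fuse_step (out : List (Int × List Int)) (e : Int × List Int) :
    gtcFuseStep ((out.getLast?).map (·.1), out.foldl splitStep ([], [])) e
      = (((raStep out e).getLast?).map (·.1), (raStep out e).foldl splitStep ([], [])) := by
  have happ : (out ++ [e]).foldl splitStep ([], []) = splitStep (out.foldl splitStep ([], [])) e := by
    rw [List.foldl_append]; rfl
  unfold gtcFuseStep raStep
  cases h : out.getLast? with
  | none =>
    have hout : out = [] := List.getLast?_eq_none_iff.mp h
    subst hout
    simp only [Option.map_none, Option.elim, Bool.false_eq_true, if_false, List.nil_append,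
      List.getLast?_singleton, Option.map_some]
    unfold splitStep
    rfl
  | some last =>
    simp only [Option.map_some, Option.elim]
    by_cases hc : last.1 ≤ e.1 - 2
    · rw [if_neg (by simp; omega), if_pos hc, happ]
      simp only [List.getLast?_append, List.getLast?_singleton]
      unfold splitStep
      rfl
    · rw [if_pos (by simp; omega), if_neg hc, h]
      simp

-- B's fused loop computes (last index of, split of) A's remove-adjacent output
lemma fuse_eq (m : List (Int × List Int)) (out : List (Int × List Int)) :
    m.foldl gtcFuseStep ((out.getLast?).map (·.1), out.foldl splitStep ([], []))
      = (((m.foldl raStep out).getLast?).map (·.1),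
         (m.foldl raStep out).foldl splitStep ([], [])) := by
  induction m generalizing out with
  | nil => rfl
  | cons e m ih =>
    simp only [List.foldl_cons]
    rw [fuse_step, ih]

-- split_to_indices_and_values is a filter + two maps
lemma split_eq (l : List (Int × List Int)) :
    l.foldl splitStep ([], [])
      = ((l.filter (fun ij => ij.2 ≠ [])).map (·.1),
         (l.filter (fun ij => ij.2 ≠ [])).map
           (fun ij => PySem.List.sorted (PySem.Set.ofList ij.2) (fun x => x))) := by
  have h : splitStep = fun (acc : List Int × List (List Int)) ij =>
      ((if ij.2 ≠ [] then acc.1 ++ [ij.1] else acc.1),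
       (if ij.2 ≠ [] then acc.2 ++ [PySem.List.sorted (PySem.Set.ofList ij.2) (fun x => x)] else acc.2)) := by
    funext acc ij; unfold splitStep; split_ifs <;> rfl
  rw [h, PySem.List.foldl_prod_mk
        (f := fun acc (ij : Int × List Int) => if ij.2 ≠ [] then acc ++ [ij.1] else acc)
        (g := fun acc (ij : Int × List Int) => if ij.2 ≠ [] then acc ++ [PySem.List.sorted (PySem.Set.ofList ij.2) (fun x => x)] else acc),
      PySem.List.foldl_append_ite (p := fun ij : Int × List Int => ij.2 ≠ []) (f := (·.1)),
      PySem.List.foldl_append_ite (p := fun ij : Int × List Int => ij.2 ≠ [])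
        (f := fun ij => PySem.List.sorted (PySem.Set.ofList ij.2) (fun x => x))]
  simp

-- the remove-adjacent output is a sublist of its input (prepended with the accumulator)
lemma ra_sublist (m : List (Int × List Int)) (out : List (Int × List Int)) :
    (m.foldl raStep out).Sublist (out ++ m) := by
  induction m generalizing out with
  | nil => simp
  | cons e m ih =>
    simp only [List.foldl_cons]
    have h : (raStep out e) = out ++ [e] ∨ raStep out e = out := by
      unfold raStep; cases out.getLast? with
      | none => exact Or.inl rfl
      | some last => dsimp only; split_ifs <;> [exact Or.inl rfl; exact Or.inr rfl]
    rcases h with h | h <;> rw [h]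
    · simpa using ih (out ++ [e])
    · exact (ih out).trans (by simp)

-- every combination drawn from itertools.product has one entry per value list
lemma pyProductInt_length (ls : List (List Int)) (c : List Int) (hc : c ∈ pyProductInt ls) :
    c.length = ls.length := by
  induction ls generalizing c with
  | nil => simp [pyProductInt] at hc; simp [hc]
  | cons xs rest ih =>
    simp only [pyProductInt, List.mem_flatMap, List.mem_map] at hc
    obtain ⟨x, _, c', hc', rfl⟩ := hc
    simp [ih c' hc']

-- one-char strings of t, as list(s) does
def charStrs (t : List Char) : List String := t.map (fun c => String.ofList [c])

-- the common shape of both builders: prefix segments interleaved with the values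
def interSpec (t : List Char) (prev : Nat) : List Int → List Int → List String
  | i :: is, v :: vs =>
      charStrs (t.take (i.toNat - prev)) ++
        PySem.Int.toStr v :: interSpec (t.drop (i.toNat - prev)) i.toNat is vs
  | _, _ => charStrs t

lemma chars_join_empty (l : List String) :
    (PySem.Str.join "" l).toList = (l.map String.toList).flatten := by
  rw [PySem.Str.toList_join]
  show PySem.Chars.join [] _ = _
  induction l with
  | nil => simp [PySem.Chars.join_nil]
  | cons p rest ih =>
    cases rest with
    | nil => simp [PySem.Chars.join_singleton]
    | cons q r =>
      simp only [List.map_cons] at ih ⊢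
      rw [PySem.Chars.join_cons_cons]
      simp only [List.flatten_cons] at ih ⊢
      rw [← ih]; simp

-- A's insertion loop, generalized: inserting values at positions k+i into P ++ chars
lemma insertFold_eq (idxs : List Int) (vals : List Int) (k prev : Nat) (P : List String)
    (t : List Char) (hP : P.length = k + prev) (hlen : vals.length = idxs.length)
    (hsort : idxs.Pairwise (· ≤ ·))
    (hb : ∀ i ∈ idxs, (prev : Int) ≤ i ∧ i ≤ (prev : Int) + t.length) :
    (List.zip (PySem.List.enumerate idxs k) vals).foldl
        (fun acc p => PySem.List.insert acc (p.1.1 + p.1.2) (PySem.Int.toStr p.2))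
        (P ++ charStrs t)
      = P ++ interSpec t prev idxs vals := by
  induction idxs generalizing vals k prev P t with
  | nil => simp [PySem.List.enumerate, interSpec]
  | cons i is ih =>
    cases vals with
    | nil => simp at hlen
    | cons v vs =>
      have hbi := hb i (by simp)
      have hprev_le : prev ≤ i.toNat := by omega
      have hd_le : i.toNat - prev ≤ t.length := by omega
      set d := i.toNat - prev with hd
      rw [PySem.List.enumerate_cons]
      simp only [List.zip_cons_cons, List.foldl_cons]
      have hpos : (k : Int) + i = ((P.length + d : Nat) : Int) := by
        push_cast; omega
      rw [hpos, PySem.List.insert_natCast _ _ _ (by simp [charStrs]; omega)]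
      rw [List.take_length_add_append, List.drop_length_add_append]
      have htk : (charStrs t).take d = charStrs (t.take d) := by simp [charStrs, List.map_take]
      have hdr : (charStrs t).drop d = charStrs (t.drop d) := by simp [charStrs, List.map_drop]
      rw [htk, hdr]
      have hre : P ++ charStrs (t.take d) ++ PySem.Int.toStr v :: charStrs (t.drop d)
          = (P ++ charStrs (t.take d) ++ [PySem.Int.toStr v]) ++ charStrs (t.drop d) := by
        simp
      rw [hre]
      have hcast : ((k : Int) + 1) = ((k + 1 : Nat) : Int) := by push_cast; ring
      rw [hcast]
      rw [ih vs (k+1) i.toNat (P ++ charStrs (t.take d) ++ [PySem.Int.toStr v]) (t.drop d)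
        (by simp [charStrs]; omega) (by simpa using hlen) (hsort.sublist (by simp))]
      · simp [interSpec, ← hd]
      · intro i' hi'
        have h1 : i ≤ i' := (List.pairwise_cons.mp hsort).1 i' hi'
        have h2 := hb i' (by simp [hi'])
        have hlen' : (t.drop d).length = t.length - d := by simp
        rw [hlen']
        constructor <;> (push_cast; omega)

-- B's segment loop, in closed form
def segList (s : String) (prev : Int) : List Int → List String
  | [] => []
  | i :: is => PySem.Str.slice s (some prev) (some i) :: segList s i is

lemma segs_fold_eq (s : String) (idxs : List Int) (acc : List String) (prev : Int) :
    idxs.foldl (fun (sp : List String × Int) i =>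
        (sp.1 ++ [PySem.Str.slice s (some sp.2) (some i)], i)) (acc, prev)
      = (acc ++ segList s prev idxs, idxs.getLastD prev) := by
  induction idxs generalizing acc prev with
  | nil => simp [segList]
  | cons i is ih =>
    simp only [List.foldl_cons, segList]
    rw [ih]
    cases is with
    | nil => simp
    | cons h t =>
      simp only [List.getLastD_eq_getLast?]
      rcases hx : (h :: t).getLast? with _ | x
      · simp at hx
      · simp [hx]

lemma flat_charStrs (t : List Char) : ((charStrs t).map String.toList).flatten = t := by
  induction t with
  | nil => rfl
  | cons c t ih => simp [charStrs] at ih ⊢; simpa using ih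

-- B's interleave of segments and values produces the same characters as interSpec
lemma segs_inter_eq (s : String) (idxs vals : List Int) (prev : Nat)
    (hlen : vals.length = idxs.length) (hsort : idxs.Pairwise (· ≤ ·))
    (hb : ∀ i ∈ idxs, (prev : Int) ≤ i ∧ i ≤ (s.toList.length : Int)) :
    ((((List.zip (segList s (prev : Int) idxs) vals).flatMap
          (fun p => [p.1, PySem.Int.toStr p.2]))
        ++ [PySem.Str.slice s (some ((idxs.getLastD (prev : Int)))) none]).map String.toList).flatten
      = ((interSpec (s.toList.drop prev) prev idxs vals).map String.toList).flatten := by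
  induction idxs generalizing vals prev with
  | nil =>
    simp [segList, interSpec, flat_charStrs]
  | cons i is ih =>
    cases vals with
    | nil => simp at hlen
    | cons v vs =>
      have hbi := hb i (by simp)
      have hi0 : 0 ≤ i := le_trans (by positivity) hbi.1
      have hicast : ((i.toNat : Nat) : Int) = i := by omega
      simp only [segList, List.zip_cons_cons, List.flatMap_cons, List.getLastD_cons,
        List.map_append, List.map_cons, List.flatten_append, List.flatten_cons]
      have hprev_le : prev ≤ i.toNat := by omega
      have hIH := ih vs i.toNat (by simpa using hlen) ((List.pairwise_cons.mp hsort).2)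
        (by intro i' hi'
            have h1 := (List.pairwise_cons.mp hsort).1 i' hi'
            have h2 := hb i' (by simp [hi'])
            omega)
      rw [hicast] at hIH
      simp only [List.map_append, List.map_cons, List.map_nil, List.flatten_append,
        List.flatten_cons, List.flatten_nil, List.append_nil] at hIH
      have hsl : (PySem.Str.slice s (some (prev : Int)) (some i)).toList
          = (s.toList.drop prev).take (i.toNat - prev) := by
        rw [PySem.Str.toList_slice]
        simp only [PySem.Chars.slice_eq_listSlice]
        rw [PySem.List.slice_toNat _ (by positivity) hi0]
        simp
      have hdd : (s.toList.drop prev).drop (i.toNat - prev) = s.toList.drop i.toNat := by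
        rw [List.drop_drop]; congr 1; omega
      simp only [interSpec, List.map_append, List.map_cons, List.flatten_append, List.flatten_cons,
        List.map_nil, List.flatten_nil, List.append_nil, flat_charStrs, hdd, hsl]
      simp [List.append_assoc]
      simpa [List.getLastD_eq_getLast?] using hIH

-- per-combination agreement of the two builders
lemma filename_eq (s : String) (idxs : List Int) (combo : List Int)
    (hlen : combo.length = idxs.length)
    (hsort : idxs.Pairwise (· ≤ ·))
    (hb : ∀ i ∈ idxs, 0 ≤ i ∧ i ≤ (s.toList.length : Int)) :
    build_filename s idxs combo
      = PySem.Str.join ""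
          (((List.zip (segList s 0 idxs) combo).foldl
              (fun ps p => ps ++ [p.1, PySem.Int.toStr p.2]) [])
            ++ [PySem.Str.slice s (some (idxs.getLastD 0)) none]) := by
  apply String.toList_inj.mp
  unfold build_filename
  rw [PySem.List.foldl_append_eq_flatMap (g := fun p : String × Int => [p.1, PySem.Int.toStr p.2])]
  simp only [List.nil_append]
  rw [chars_join_empty, chars_join_empty]
  have hA : (s.toList.map (fun c => String.ofList [c])) = ([] : List String) ++ charStrs s.toList := by
    simp [charStrs]
  have hins := insertFold_eq idxs combo 0 0 [] s.toList (by simp) hlen hsort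
      (by intro i hi; have := hb i hi; simpa using this)
  simp only [Nat.cast_zero, List.nil_append] at hins
  rw [hA, List.nil_append, hins]
  have hseg := segs_inter_eq s idxs combo 0 hlen hsort
      (by intro i hi; have := hb i hi; simpa using this)
  simp only [Nat.cast_zero, List.drop_zero] at hseg
  rw [← hseg]

-- ===== VERDICT (by name: the statement is the Claim_ definition above) =====
set_option maxHeartbeats 1000000 in
theorem gen_test_case_spec : Claim_equal_gen_test_case := by
  intro s n _
  unfold Spec_gen_test_case
  simp only [gen_test_case, gen_test_case_alt]
  have hnorm : n.map (fun ij => ((if PySem.Str.len s ≠ 0 then PySem.Int.mod ij.1 (PySem.Str.len s + 1) else 0), ij.2))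
      = n.map (fun ij => (gen_index_via_mod s ij.1, ij.2)) := by
    apply List.map_congr_left; intro ij _; rw [gim_eq]
  rw [hnorm]
  set n2 := PySem.List.sorted (n.map (fun ij => (gen_index_via_mod s ij.1, ij.2))) (fun x => x.1) with hn2
  have hfuse : n2.foldl gtcFuseStep (none, [], [])
      = (((n2.foldl raStep []).getLast?).map (·.1), (n2.foldl raStep []).foldl splitStep ([], [])) := by
    simpa using fuse_eq n2 []
  rw [hfuse]
  set rm := n2.foldl raStep [] with hrm
  set F := rm.filter (fun ij => ij.2 ≠ []) with hF
  have hsplit := split_eq rm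
  have hmem : ∀ x ∈ rm, 0 ≤ x.1 ∧ x.1 ≤ (s.toList.length : Int) := by
    intro x hx
    have hx2 : x ∈ n2 := (ra_sublist n2 []).subset (by simpa using hx)
    have hx3 : x ∈ n.map (fun ij => (gen_index_via_mod s ij.1, ij.2)) :=
      (PySem.List.mem_sorted _ _ _ _).mp hx2
    obtain ⟨ij, _, rfl⟩ := List.mem_map.mp hx3
    exact gim_bounds s ij.1
  have hpw : rm.Pairwise (fun a b => a.1 ≤ b.1) := by
    have h1 := PySem.List.sorted_pairwise (n.map (fun ij => (gen_index_via_mod s ij.1, ij.2))) (fun x => x.1)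
    have h2 : rm.Sublist n2 := by simpa using ra_sublist n2 []
    exact h1.sublist h2
  have hsortF : (F.map (·.1)).Pairwise (· ≤ ·) := by
    rw [List.pairwise_map]
    exact hpw.sublist List.filter_sublist
  have hbF : ∀ i ∈ F.map (·.1), 0 ≤ i ∧ i ≤ (s.toList.length : Int) := by
    intro i hi
    obtain ⟨x, hx, rfl⟩ := List.mem_map.mp hi
    exact hmem x (List.mem_of_mem_filter hx)
  have hA1 : split_to_indices_and_values (remove_adjacent_nums n2) = rm.foldl splitStep ([], []) := rfl
  rw [hA1, hsplit, segs_fold_eq]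
  rw [PySem.List.foldl_append_singleton_eq_map (f := fun v => build_filename s (F.map (·.1)) v),
      PySem.List.foldl_append_singleton_eq_map]
  simp only [List.nil_append]
  apply List.map_congr_left
  intro combo hcombo
  have hlen : combo.length = (F.map (·.1)).length := by
    rw [pyProductInt_length _ _ hcombo]; simp [hF]
  exact filename_eq s (F.map (·.1)) combo hlen hsortF hbF
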